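-- pv_equiv track=rewrite | github.com/jullynobre/turtleApplication | helper.py | get_index_of_next_operator
-- ===== SOURCE A (Python) =====
-- def get_index_of_next_operator(func):
--     if func.find("(") < 0:
--         sum = func.find("+")
--         sub = func.find("-")
--         mul = func.find("*")
--         div = func.find("/")
--         if (mul != -1) and ((mul < div) or (div == -1)):
--             return mul
--         elif div != -1:
--             return div
--         elif sum < sub and sum != -1:
--             return sum
--         else:
--             return sub
--     else:
--         sub_func = func[func.find("(")+1:func.find(")")]
--         return func.find("(") + 1 + get_index_of_next_operator(sub_func)
-- ===== SOURCE B (Python) =====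
-- def _first_operator_index(func):
--     # multiplicative operators bind the scan first
--     for i, c in enumerate(func):
--         if c in "*/":
--             return i
--     # otherwise: the first '-', unless a '+' comes before it
--     m = func.find("-")
--     p = func.find("+")
--     if 0 <= p < m:
--         return p
--     return m
--
--
-- def get_index_of_next_operator(func):
--     offset = 0
--     start = func.find("(")
--     while start >= 0:
--         func = func[start + 1:func.find(")")]
--         offset += start + 1
--         start = func.find("(")
--     return offset + _first_operator_index(func)
-- ===== Notes on version B (the rewrite author's own statement) =====
-- stated objective: alternative
-- what changed: The recursive parenthesis descent becomes an iterative strip loop accumulating an offset, and the four-find comparison cascade becomes a left-to-right scan for '*'/'/' followed by a first-'-'-unless-'+'-precedes rule.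
import Mathlib
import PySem

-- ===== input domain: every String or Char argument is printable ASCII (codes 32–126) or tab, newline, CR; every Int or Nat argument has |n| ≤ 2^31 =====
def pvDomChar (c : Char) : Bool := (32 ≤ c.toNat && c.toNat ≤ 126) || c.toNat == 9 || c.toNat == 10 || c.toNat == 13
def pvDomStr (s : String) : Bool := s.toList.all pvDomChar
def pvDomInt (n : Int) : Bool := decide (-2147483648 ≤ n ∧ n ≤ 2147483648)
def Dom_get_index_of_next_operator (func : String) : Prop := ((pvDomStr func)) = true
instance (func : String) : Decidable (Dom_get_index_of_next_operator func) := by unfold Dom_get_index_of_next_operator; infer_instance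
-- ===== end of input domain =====

-- B replaces A's recursive parenthesis descent by an iterative strip loop with an offset
-- accumulator, and A's four-find comparison cascade by a '*'/'/' scan followed by a
-- first-'-'-unless-'+'-precedes rule (alternative decomposition, no speed claim).
-- Both ports run on a Nat fuel of length+1, a pure totality guard: each paren-stripping
-- step shortens the string, so the fuel is never exhausted.

-- ===== PORT A =====
def pvGoA : Nat → String → Int
  | 0, _ => -1  -- never reached: fuel starts at length+1 and each step shortens the string
  | (fuel + 1), func =>
    if PySem.Str.find func "(" < 0 then
      let sum := PySem.Str.find func "+"
      let sub := PySem.Str.find func "-"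
      let mul := PySem.Str.find func "*"
      let div := PySem.Str.find func "/"
      if mul ≠ -1 ∧ (mul < div ∨ div = -1) then mul
      else if div ≠ -1 then div
      else if sum < sub ∧ sum ≠ -1 then sum
      else sub
    else
      let sub_func := PySem.Str.slice func (some (PySem.Str.find func "(" + 1))
        (some (PySem.Str.find func ")"))
      PySem.Str.find func "(" + 1 + pvGoA fuel sub_func

def get_index_of_next_operator (func : String) : Int :=
  pvGoA (func.toList.length + 1) func

-- ===== PORT B =====
-- the `for i, c in enumerate(...)` scan of _first_operator_index: first index (from i)
-- holding one of the two given characters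
def pvScan2 (c1 c2 : Char) : Int → List Char → Option Int
  | _, [] => none
  | i, c :: cs => if c = c1 ∨ c = c2 then some i else pvScan2 c1 c2 (i + 1) cs

def first_operator_index (func : String) : Int :=
  match pvScan2 '*' '/' 0 func.toList with
  | some i => i
  | none =>
    let m := PySem.Str.find func "-"
    let p := PySem.Str.find func "+"
    if 0 ≤ p ∧ p < m then p else m

-- the while-loop of B: strip the first parenthesis group, accumulating the offset
def pvGoB : Nat → Int → String → Int
  | 0, offset, _ => offset  -- never reached: fuel starts at length+1 and each step shortens
  | (fuel + 1), offset, func =>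
    let start := PySem.Str.find func "("
    if start < 0 then offset + first_operator_index func
    else pvGoB fuel (offset + start + 1)
      (PySem.Str.slice func (some (start + 1)) (some (PySem.Str.find func ")")))

def get_index_of_next_operator_alt (func : String) : Int :=
  pvGoB (func.toList.length + 1) 0 func

-- ===== PRECONDITION & SPEC =====
def Spec_get_index_of_next_operator (func : String) (out : Int) : Prop := out = get_index_of_next_operator_alt func
instance (func : String) (out : Int) : Decidable (Spec_get_index_of_next_operator func out) := by unfold Spec_get_index_of_next_operator; infer_instance

-- ===== CLAIM (what is proved, stated in full; the proofs are below) =====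
def Claim_equal_get_index_of_next_operator : Prop := ∀ (func : String), Dom_get_index_of_next_operator func → Spec_get_index_of_next_operator func (get_index_of_next_operator func)

-- ===== LEMMAS AND PROOFS =====

-- each paren-stripping step strictly shortens the string
theorem pvSliceShrink (func : String) (h : ¬ PySem.Str.find func "(" < 0) (b? : Option Int) :
    (PySem.Str.slice func (some (PySem.Str.find func "(" + 1)) b?).toList.length
      < func.toList.length := by
  have hne : func.toList ≠ [] := by
    have hinf : ("(".toList) <:+: func.toList := by
      have := (PySem.Str.find_nonneg_iff func "(").mp (by omega)
      simpa using this
    intro hnil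
    rw [hnil] at hinf
    simp at hinf
  have hlen : 0 < func.toList.length := List.length_pos_iff.mpr hne
  have hf : 0 ≤ PySem.Str.find func "(" := by omega
  rw [PySem.Str.toList_slice, PySem.Chars.slice_eq_listSlice]
  simp only [PySem.List.slice, PySem.List.clampIdx]
  have h1 : (1 : Int) ≤ PySem.Str.find func "(" + 1 := by omega
  split_ifs with h2 <;>
  · simp only [List.length_take, List.length_drop]
    omega

-- shift a find result by one position
def pvBump (x : Int) : Int := if x = -1 then -1 else x + 1

theorem pvGoSucc (sub : List Char) : ∀ (cs : List Char) (k : Nat),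
    PySem.Chars.find.go sub cs (k + 1) = pvBump (PySem.Chars.find.go sub cs k) := by
  intro cs
  induction cs with
  | nil =>
    intro k
    simp only [PySem.Chars.find.go]
    split_ifs <;> simp [pvBump]
  | cons a cs ih =>
    intro k
    simp only [PySem.Chars.find.go]
    split_ifs with h
    · simp [pvBump]
    · exact ih (k + 1)

theorem pvFindCons (a c : Char) (cs : List Char) :
    PySem.Chars.find (a :: cs) [c] =
      if a = c then 0 else pvBump (PySem.Chars.find cs [c]) := by
  have hpre : ([c].isPrefixOf (a :: cs)) = (a == c) := by
    by_cases h : a = c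
    · simp [List.isPrefixOf, h]
    · simp [List.isPrefixOf, h, Ne.symm h]
  show PySem.Chars.find.go [c] (a :: cs) 0 = _
  rw [show PySem.Chars.find.go [c] (a :: cs) 0
        = if [c].isPrefixOf (a :: cs) then (0 : Int) else PySem.Chars.find.go [c] cs (0 + 1) from by
      simp [PySem.Chars.find.go]]
  rw [hpre, pvGoSucc [c] cs 0]
  simp [PySem.Chars.find]

theorem pvFindNeg1 (cs : List Char) (c : Char) :
    PySem.Chars.find cs [c] ≥ -1 := PySem.Chars.neg_one_le_find cs [c]

-- the earlier of two find results (-1 = absent)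
def pvMin2 (a b : Int) : Int := if a ≠ -1 ∧ (a < b ∨ b = -1) then a else b

theorem pvMin2_zero_left (d : Int) (hd : d ≥ -1) : pvMin2 0 (pvBump d) = 0 := by
  by_cases h : d = -1 <;> simp [pvMin2, pvBump, h]
  all_goals try intros
  all_goals omega

theorem pvMin2_zero_right (m : Int) (hm : m ≥ -1) : pvMin2 (pvBump m) 0 = 0 := by
  by_cases h : m = -1 <;> simp [pvMin2, pvBump, h]
  all_goals try intros
  all_goals omega

theorem pvMin2_bump (m d : Int) (hm : m ≥ -1) (hd : d ≥ -1) :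
    pvMin2 (pvBump m) (pvBump d) = pvBump (pvMin2 m d) := by
  by_cases h : m = -1 <;> by_cases h2 : d = -1 <;> simp [pvMin2, pvBump, h, h2]
  all_goals try split_ifs
  all_goals try intros
  all_goals omega

theorem pvScan2Cons (c1 c2 : Char) (i : Int) (c : Char) (cs : List Char) :
    pvScan2 c1 c2 i (c :: cs) = if c = c1 ∨ c = c2 then some i else pvScan2 c1 c2 (i + 1) cs := rfl

theorem pvScan2Shift (c1 c2 : Char) : ∀ (cs : List Char) (i : Int),
    pvScan2 c1 c2 (i + 1) cs = (pvScan2 c1 c2 i cs).map (· + 1) := by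
  intro cs
  induction cs with
  | nil => intro i; rfl
  | cons c cs ih =>
    intro i
    rw [pvScan2Cons, pvScan2Cons]
    split_ifs with h
    · simp
    · exact ih (i + 1)

theorem pvScan2Nonneg (c1 c2 : Char) : ∀ (cs : List Char) (i : Int), 0 ≤ i →
    ∀ j, pvScan2 c1 c2 i cs = some j → 0 ≤ j := by
  intro cs
  induction cs with
  | nil => intro i _ j h; simp [pvScan2] at h
  | cons c cs ih =>
    intro i hi j h
    rw [pvScan2Cons] at h
    split_ifs at h with hc
    · injection h with h; omega
    · exact ih (i + 1) (by omega) j h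

-- the scan, folded to an Int with -1 for "none"
def pvS2 (c1 c2 : Char) (cs : List Char) : Int :=
  match pvScan2 c1 c2 0 cs with
  | some i => i
  | none => -1

theorem pvS2_eq (c1 c2 : Char) (h12 : c1 ≠ c2) (cs : List Char) :
    pvS2 c1 c2 cs = pvMin2 (PySem.Chars.find cs [c1]) (PySem.Chars.find cs [c2]) := by
  induction cs with
  | nil => simp [pvS2, pvScan2, pvMin2, PySem.Chars.find, PySem.Chars.find.go]
  | cons a cs ih =>
    have hm := pvFindNeg1 cs c1
    have hd := pvFindNeg1 cs c2
    rw [pvFindCons, pvFindCons]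
    by_cases h1 : a = c1
    · subst h1
      have h0 : pvS2 a c2 (a :: cs) = 0 := by simp [pvS2, pvScan2]
      rw [h0, if_pos rfl, if_neg h12]
      exact (pvMin2_zero_left _ hd).symm
    · by_cases h2 : a = c2
      · subst h2
        have h0 : pvS2 c1 a (a :: cs) = 0 := by simp [pvS2, pvScan2]
        rw [h0, if_neg h1, if_pos rfl]
        exact (pvMin2_zero_right _ hm).symm
      · have hstep : pvS2 c1 c2 (a :: cs) = pvBump (pvS2 c1 c2 cs) := by
          unfold pvS2
          rw [pvScan2Cons, if_neg (by tauto), pvScan2Shift c1 c2 cs 0]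
          cases h : pvScan2 c1 c2 0 cs with
          | none => simp [pvBump]
          | some j =>
            have hj := pvScan2Nonneg c1 c2 cs 0 le_rfl j h
            show j + 1 = pvBump j
            simp only [pvBump]
            rw [if_neg (by omega)]
        rw [hstep, ih, if_neg h1, if_neg h2]
        exact (pvMin2_bump _ _ hm hd).symm

-- B's flat selection equals A's base-case cascade
theorem pvFlatEq (func : String) :
    first_operator_index func =
      (let sum := PySem.Str.find func "+"
       let sub := PySem.Str.find func "-"
       let mul := PySem.Str.find func "*"
       let div := PySem.Str.find func "/"
       if mul ≠ -1 ∧ (mul < div ∨ div = -1) then mul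
       else if div ≠ -1 then div
       else if sum < sub ∧ sum ≠ -1 then sum
       else sub) := by
  have hmd := pvS2_eq '*' '/' (by decide) func.toList
  have hm := pvFindNeg1 func.toList '*'
  have hd := pvFindNeg1 func.toList '/'
  have hp := pvFindNeg1 func.toList '+'
  have hb := pvFindNeg1 func.toList '-'
  simp only [PySem.Str.find_eq]
  rw [show ("+".toList) = ['+'] from rfl, show ("-".toList) = ['-'] from rfl,
    show ("*".toList) = ['*'] from rfl, show ("/".toList) = ['/'] from rfl]
  show (match pvScan2 '*' '/' 0 func.toList with
        | some i => i
        | none =>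
          let m := PySem.Chars.find func.toList ['-']
          let p := PySem.Chars.find func.toList ['+']
          if 0 ≤ p ∧ p < m then p else m) = _
  cases hscan : pvScan2 '*' '/' 0 func.toList with
  | some i =>
    have hi := pvScan2Nonneg '*' '/' func.toList 0 le_rfl i hscan
    have hval : i = pvMin2 (PySem.Chars.find func.toList ['*']) (PySem.Chars.find func.toList ['/']) := by
      rw [← hmd]; simp [pvS2, hscan]
    show i = _
    simp only [pvMin2] at hval
    split_ifs at hval ⊢ <;> omega
  | none =>
    have hnone : pvMin2 (PySem.Chars.find func.toList ['*']) (PySem.Chars.find func.toList ['/']) = -1 := by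
      rw [← hmd]; simp [pvS2, hscan]
    have hmd' : PySem.Chars.find func.toList ['*'] = -1 ∧ PySem.Chars.find func.toList ['/'] = -1 := by
      simp only [pvMin2] at hnone
      split_ifs at hnone <;> omega
    show (let m := PySem.Chars.find func.toList ['-']
          let p := PySem.Chars.find func.toList ['+']
          if 0 ≤ p ∧ p < m then p else m) = _
    simp only
    rw [if_neg (show ¬(PySem.Chars.find func.toList ['*'] ≠ -1 ∧
          (PySem.Chars.find func.toList ['*'] < PySem.Chars.find func.toList ['/'] ∨
           PySem.Chars.find func.toList ['/'] = -1)) from fun h => h.1 hmd'.1),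
       if_neg (show ¬(PySem.Chars.find func.toList ['/'] ≠ -1) from fun h => h hmd'.2)]
    split_ifs <;> omega

-- with enough fuel, B's strip loop computes offset + A's recursive value
theorem pvGoEq : ∀ (fuel : Nat) (func : String), func.toList.length < fuel →
    ∀ (offset : Int), pvGoB fuel offset func = offset + pvGoA fuel func := by
  intro fuel
  induction fuel with
  | zero => intro func hlen; omega
  | succ fuel ih =>
    intro func hlen offset
    rw [pvGoB, pvGoA]
    by_cases h : PySem.Str.find func "(" < 0
    · rw [if_pos h, if_pos h, pvFlatEq]
    · rw [if_neg h, if_neg h]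
      have hsh := pvSliceShrink func h (some (PySem.Str.find func ")"))
      rw [ih _ (by omega)]
      ring

-- ===== VERDICT (by name: the statement is the Claim_ definition above) =====
theorem get_index_of_next_operator_spec : Claim_equal_get_index_of_next_operator := by
  intro func _
  unfold Spec_get_index_of_next_operator get_index_of_next_operator_alt get_index_of_next_operator
  rw [pvGoEq (func.toList.length + 1) func (by omega) 0]
  ring
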